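-- pv_equiv track=rewrite | github.com/ZhDmitrii/Technology | Task_itertools_module.py | combine_lists_with_cycle
-- ===== SOURCE A (Python) =====
-- import itertools
-- import itertools
--
-- def combine_lists_with_cycle(list_1, list_2, list_3, cycles=5):
--     """Объединяет три списка в один, циклически повторяя элементы."""
--
--     # Создаём бесконечные циклы для каждого списка
--     cycle_1 = itertools.cycle(list_1)
--     cycle_2 = itertools.cycle(list_2)
--     cycle_3 = itertools.cycle(list_3)
--
--     result = []
--
--     # Выполняем заданное количество циклов
--     for _ in range(cycles):
--         # Берём по одному элементу из каждого цикла
--         result.append(next(cycle_1))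
--         result.append(next(cycle_2))
--         result.append(next(cycle_3))
--
--     return result
-- ===== SOURCE B (Python) =====
-- def combine_lists_with_cycle(list_1, list_2, list_3, cycles=5):
--     """Объединяет три списка в один, циклически повторяя элементы."""
--     n = max(cycles, 0)
--     seq1 = [list_1[i % len(list_1)] for i in range(n)]
--     seq2 = [list_2[i % len(list_2)] for i in range(n)]
--     seq3 = [list_3[i % len(list_3)] for i in range(n)]
--     return [x for trio in zip(seq1, seq2, seq3) for x in trio]
-- ===== Notes on version B (the rewrite author's own statement) =====
-- stated objective: alternative
-- what changed: Replaces the single interleaved next()-driven loop over three itertools.cycle iterators by three independent modular-indexing generation passes followed by one zip-and-flatten interleaving pass.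
import Mathlib
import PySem

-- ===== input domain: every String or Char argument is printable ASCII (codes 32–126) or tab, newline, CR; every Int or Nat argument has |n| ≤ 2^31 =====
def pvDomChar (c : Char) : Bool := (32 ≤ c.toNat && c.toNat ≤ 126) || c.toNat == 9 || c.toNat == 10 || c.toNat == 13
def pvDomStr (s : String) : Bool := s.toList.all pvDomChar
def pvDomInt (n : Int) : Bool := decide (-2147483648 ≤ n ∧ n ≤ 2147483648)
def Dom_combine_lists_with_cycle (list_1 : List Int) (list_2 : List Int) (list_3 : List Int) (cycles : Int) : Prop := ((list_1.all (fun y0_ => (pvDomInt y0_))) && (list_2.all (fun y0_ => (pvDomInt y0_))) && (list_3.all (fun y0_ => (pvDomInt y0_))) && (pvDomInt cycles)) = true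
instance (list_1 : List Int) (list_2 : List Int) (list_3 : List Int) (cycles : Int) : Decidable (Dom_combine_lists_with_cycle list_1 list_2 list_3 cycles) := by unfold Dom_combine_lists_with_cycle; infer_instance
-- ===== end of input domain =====

-- B replaces A's single next()-driven loop over three itertools.cycle iterators by three
-- independent modular-indexing generation passes plus one zip-and-flatten interleaving pass
-- (alternative decomposition, same cost).


-- ===== PORT A =====
-- next(cycle_k) at loop step i yields list_k[i % len(list_k)]; under Pre_ the index is in
-- range, so the .getD 0 default is never taken.
def combine_lists_with_cycle (list_1 : List Int) (list_2 : List Int) (list_3 : List Int) (cycles : Int) : List Int :=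
  (PySem.List.pyRange 0 cycles 1).foldl (fun result i =>
    result
      ++ [(PySem.List.pyGet? list_1 (PySem.Int.mod i (list_1.length : Int))).getD 0]
      ++ [(PySem.List.pyGet? list_2 (PySem.Int.mod i (list_2.length : Int))).getD 0]
      ++ [(PySem.List.pyGet? list_3 (PySem.Int.mod i (list_3.length : Int))).getD 0]) []

-- ===== PORT B =====
def combine_lists_with_cycle_alt (list_1 : List Int) (list_2 : List Int) (list_3 : List Int) (cycles : Int) : List Int :=
  let n := max cycles 0
  let seq1 := (PySem.List.pyRange 0 n 1).map (fun i => (PySem.List.pyGet? list_1 (PySem.Int.mod i (list_1.length : Int))).getD 0)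
  let seq2 := (PySem.List.pyRange 0 n 1).map (fun i => (PySem.List.pyGet? list_2 (PySem.Int.mod i (list_2.length : Int))).getD 0)
  let seq3 := (PySem.List.pyRange 0 n 1).map (fun i => (PySem.List.pyGet? list_3 (PySem.Int.mod i (list_3.length : Int))).getD 0)
  (seq1.zip (seq2.zip seq3)).flatMap (fun trio => [trio.1, trio.2.1, trio.2.2])

-- ===== PRECONDITION & SPEC =====
-- Pre_ excludes cycles > 0 with an empty input list: there A raises StopIteration (next on
-- an exhausted itertools.cycle of an empty list) and B raises ZeroDivisionError.
def Pre_combine_lists_with_cycle (list_1 : List Int) (list_2 : List Int) (list_3 : List Int) (cycles : Int) : Prop :=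
  0 < cycles → (list_1 ≠ [] ∧ list_2 ≠ [] ∧ list_3 ≠ [])
instance (list_1 : List Int) (list_2 : List Int) (list_3 : List Int) (cycles : Int) : Decidable (Pre_combine_lists_with_cycle list_1 list_2 list_3 cycles) := by unfold Pre_combine_lists_with_cycle; infer_instance
def pvWitness_combine_lists_with_cycle : List Int × List Int × List Int × Int := ([1, 2], [3], [4, 5, 6], 5)

def Spec_combine_lists_with_cycle (list_1 : List Int) (list_2 : List Int) (list_3 : List Int) (cycles : Int) (out : List Int) : Prop := out = combine_lists_with_cycle_alt list_1 list_2 list_3 cycles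
instance (list_1 : List Int) (list_2 : List Int) (list_3 : List Int) (cycles : Int) (out : List Int) : Decidable (Spec_combine_lists_with_cycle list_1 list_2 list_3 cycles out) := by unfold Spec_combine_lists_with_cycle; infer_instance

-- ===== CLAIM (what is proved, stated in full; the proofs are below) =====
def Claim_equal_combine_lists_with_cycle : Prop := ∀ (list_1 : List Int) (list_2 : List Int) (list_3 : List Int) (cycles : Int), Dom_combine_lists_with_cycle list_1 list_2 list_3 cycles → Pre_combine_lists_with_cycle list_1 list_2 list_3 cycles → Spec_combine_lists_with_cycle list_1 list_2 list_3 cycles (combine_lists_with_cycle list_1 list_2 list_3 cycles)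

-- ===== LEMMAS AND PROOFS =====

-- A's interleaved append-fold over any index list equals B's zip-of-three-maps flattened.
theorem pv_interleave (f1 f2 f3 : Int → Int) (r : List Int) (acc : List Int) :
    r.foldl (fun res i => res ++ [f1 i] ++ [f2 i] ++ [f3 i]) acc
      = acc ++ ((r.map f1).zip ((r.map f2).zip (r.map f3))).flatMap
          (fun trio => [trio.1, trio.2.1, trio.2.2]) := by
  induction r generalizing acc with
  | nil => simp
  | cons a t ih =>
    rw [List.foldl_cons, ih]
    simp [List.append_assoc]

-- ===== VERDICT (by name: the statement is the Claim_ definition above) =====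

theorem combine_lists_with_cycle_spec : Claim_equal_combine_lists_with_cycle := by
  intro l1 l2 l3 cycles _ _
  unfold Spec_combine_lists_with_cycle combine_lists_with_cycle combine_lists_with_cycle_alt
  by_cases h : cycles ≤ 0
  · have hm : max cycles 0 = 0 := by omega
    have he : PySem.List.pyRange 0 cycles 1 = [] := by
      simp [PySem.List.pyRange, show ¬ (0:Int) < cycles from not_lt.mpr h]
    rw [hm, he]
    rfl
  · have hm : max cycles 0 = cycles := by omega
    -- (0 < cycles here)
    rw [hm, pv_interleave]
    simp
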